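-- pv_equiv track=rewrite | github.com/arthurkota/lothus | lotofacil.py | validate_rows_columns
-- ===== SOURCE A (Python) =====
-- def validate_rows_columns(combination):
--     # Create a 5x5 matrix and check if the combination does not form a full row or column
--     matrix = [[0] * 5 for _ in range(5)]
--     for i, num in enumerate(range(1, 26)):
--         matrix[i // 5][i % 5] = num
--     for row in matrix:
--         if sum(1 for num in row if num in combination) in [0,5]:
--             return False
--     for col in range(5):
--         if sum(1 for row in matrix if row[col] in combination) in [0,5]:
--             return False
--     return True
-- ===== SOURCE B (Python) =====
-- def validate_rows_columns(combination):
--     # Single pass over the DISTINCT picked numbers (no grid, no membership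
--     # scans): number n sits at row (n-1)//5, column (n-1)%5, so tally both
--     # in one sweep and demand every tally is strictly between 0 and 5.
--     rows = [0] * 5
--     cols = [0] * 5
--     for n in set(combination):
--         if 1 <= n <= 25:
--             rows[(n - 1) // 5] += 1
--             cols[(n - 1) % 5] += 1
--     return all(0 < t < 5 for t in rows) and all(0 < t < 5 for t in cols)
-- ===== Notes on version B (the rewrite author's own statement) =====
-- stated objective: simpler
-- what changed: A builds a 5x5 grid and, for each of the 10 lines, scans the grid testing every cell for membership in the combination (early return on a full/empty line); B inverts the traversal: one pass over the distinct elements of the combination itself, bucketing each in-range number into row/column tallies by index arithmetic, then checks all ten tallies at the end - no grid, no membership tests, no early return.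
import Mathlib
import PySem

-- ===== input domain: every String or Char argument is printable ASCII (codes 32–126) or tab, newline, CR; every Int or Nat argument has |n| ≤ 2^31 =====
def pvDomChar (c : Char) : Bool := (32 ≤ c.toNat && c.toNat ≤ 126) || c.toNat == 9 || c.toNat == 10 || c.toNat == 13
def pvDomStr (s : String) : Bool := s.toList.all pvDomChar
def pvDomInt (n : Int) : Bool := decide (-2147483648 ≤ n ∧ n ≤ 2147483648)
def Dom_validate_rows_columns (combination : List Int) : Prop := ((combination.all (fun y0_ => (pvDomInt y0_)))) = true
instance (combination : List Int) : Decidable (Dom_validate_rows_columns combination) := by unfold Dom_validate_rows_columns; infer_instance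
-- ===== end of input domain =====

-- B replaces A's grid build + 10 membership scans by ONE pass over the distinct
-- elements of the combination, bucketing each in-range number into row/column
-- tallies by index arithmetic; objective: simpler.

set_option maxRecDepth 8000

-- ===== PORT A =====
-- early-return loop over the matrix rows ('return False' = some false)
def vrcRowsLoop (combination : List Int) : List (List Int) → Option Bool
  | [] => none
  | row :: rest =>
    if [0, 5].contains (row.foldl (fun acc num => if combination.contains num then acc + 1 else acc) (0 : Int)) then some false
    else vrcRowsLoop combination rest

-- early-return loop over the column indices
def vrcColsLoop (combination : List Int) (matrix : List (List Int)) : List Int → Option Bool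
  | [] => none
  | col :: rest =>
    if [0, 5].contains (matrix.foldl (fun acc row => if combination.contains (PySem.List.pyGetD row col 0) then acc + 1 else acc) (0 : Int)) then some false
    else vrcColsLoop combination matrix rest

def validate_rows_columns (combination : List Int) : Bool :=
  let matrix0 : List (List Int) := List.replicate 5 (List.replicate 5 (0 : Int))
  let matrix := (PySem.List.enumerate (PySem.List.pyRange 1 26 1) 0).foldl
    (fun m p => PySem.List.pySetD m (PySem.Int.floordiv p.1 5)
        (PySem.List.pySetD (PySem.List.pyGetD m (PySem.Int.floordiv p.1 5) []) (PySem.Int.mod p.1 5) p.2)) matrix0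
  (((vrcRowsLoop combination matrix).orElse
      (fun _ => vrcColsLoop combination matrix (PySem.List.pyRange 0 5 1))).getD true)

-- ===== PORT B =====
-- loop body: bucket one distinct number into the row and column tallies
-- (the indices (n-1)//5 and (n-1)%5 are nonnegative under the 1 ≤ n guard,
-- so '.toNat' is exact here)
def vrcStep (st : List Int × List Int) (n : Int) : List Int × List Int :=
  if 1 ≤ n ∧ n ≤ 25 then
    (st.1.set (PySem.Int.floordiv (n - 1) 5).toNat
        (st.1.getD (PySem.Int.floordiv (n - 1) 5).toNat 0 + 1),
     st.2.set (PySem.Int.mod (n - 1) 5).toNat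
        (st.2.getD (PySem.Int.mod (n - 1) 5).toNat 0 + 1))
  else st

def validate_rows_columns_alt (combination : List Int) : Bool :=
  let st := (PySem.Set.ofList combination).foldl vrcStep
    ([0, 0, 0, 0, 0], [0, 0, 0, 0, 0])
  (st.1.all fun t => decide (0 < t) && decide (t < 5)) &&
  (st.2.all fun t => decide (0 < t) && decide (t < 5))

-- ===== PRECONDITION & SPEC =====
def Spec_validate_rows_columns (combination : List Int) (out : Bool) : Prop := out = validate_rows_columns_alt combination
instance (combination : List Int) (out : Bool) : Decidable (Spec_validate_rows_columns combination out) := by unfold Spec_validate_rows_columns; infer_instance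

-- ===== CLAIM =====
def Claim_equal_validate_rows_columns : Prop := ∀ (combination : List Int), Dom_validate_rows_columns combination → Spec_validate_rows_columns combination (validate_rows_columns combination)

-- ===== LEMMAS AND PROOFS =====
-- number of elements of s falling in row r / column c of the grid
def cntR (r : Int) (s : List Int) : Nat :=
  s.countP (fun n => decide (1 ≤ n ∧ n ≤ 25 ∧ PySem.Int.floordiv (n - 1) 5 = r))
def cntC (c : Int) (s : List Int) : Nat :=
  s.countP (fun n => decide (1 ≤ n ∧ n ≤ 25 ∧ PySem.Int.mod (n - 1) 5 = c))

theorem fold_eq (s : List Int) (a0 a1 a2 a3 a4 b0 b1 b2 b3 b4 : Int) :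
    s.foldl vrcStep ([a0, a1, a2, a3, a4], [b0, b1, b2, b3, b4]) =
      ([a0 + cntR 0 s, a1 + cntR 1 s, a2 + cntR 2 s, a3 + cntR 3 s, a4 + cntR 4 s],
       [b0 + cntC 0 s, b1 + cntC 1 s, b2 + cntC 2 s, b3 + cntC 3 s, b4 + cntC 4 s]) := by
  induction s generalizing a0 a1 a2 a3 a4 b0 b1 b2 b3 b4 with
  | nil => simp [cntR, cntC]
  | cons n t ih =>
    rw [List.foldl_cons]
    by_cases h : 1 ≤ n ∧ n ≤ 25
    · obtain ⟨h1, h2⟩ := h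
      interval_cases n <;>
        (simp only [vrcStep]
         norm_num [PySem.Int.floordiv_eq_ediv_of_pos (by norm_num : (0:Int) < 5),
                   PySem.Int.mod_eq_emod_of_pos (by norm_num : (0:Int) < 5),
                   Int.toNat, List.getD, List.set]
         rw [ih]
         simp only [cntR, cntC, List.countP_cons, List.cons.injEq, Prod.mk.injEq]
         norm_num
         push_cast
         omega)
    · have hfr : ∀ r : Int, decide (1 ≤ n ∧ n ≤ 25 ∧ PySem.Int.floordiv (n - 1) 5 = r) = false :=
        fun r => decide_eq_false (fun hh => h ⟨hh.1, hh.2.1⟩)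
      have hfc : ∀ r : Int, decide (1 ≤ n ∧ n ≤ 25 ∧ PySem.Int.mod (n - 1) 5 = r) = false :=
        fun r => decide_eq_false (fun hh => h ⟨hh.1, hh.2.1⟩)
      have hR : ∀ r : Int, cntR r (n :: t) = cntR r t := by
        intro r; simp only [cntR, List.countP_cons, hfr r]; simp
      have hC : ∀ r : Int, cntC r (n :: t) = cntC r t := by
        intro r; simp only [cntC, List.countP_cons, hfc r]; simp
      simp only [vrcStep, if_neg h]
      rw [ih, hR 0, hR 1, hR 2, hR 3, hR 4, hC 0, hC 1, hC 2, hC 3, hC 4]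

theorem matrix_lit : (PySem.List.enumerate (PySem.List.pyRange 1 26 1) 0).foldl
    (fun m p => PySem.List.pySetD m (PySem.Int.floordiv p.1 5)
        (PySem.List.pySetD (PySem.List.pyGetD m (PySem.Int.floordiv p.1 5) []) (PySem.Int.mod p.1 5) p.2))
    (List.replicate 5 (List.replicate 5 (0 : Int)))
  = [[1,2,3,4,5],[6,7,8,9,10],[11,12,13,14,15],[16,17,18,19,20],[21,22,23,24,25]] := by decide

theorem rowsLoop_eq (c : List Int) (rows : List (List Int)) :
    vrcRowsLoop c rows = if rows.any (fun row => [0,5].contains (row.foldl (fun acc num => if c.contains num then acc + 1 else acc) (0 : Int))) then some false else none := by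
  induction rows with
  | nil => rfl
  | cons r rest ih =>
    simp only [vrcRowsLoop, ih, List.any_cons]
    by_cases h : ([0,5] : List Int).contains (r.foldl (fun acc num => if c.contains num then acc + 1 else acc) (0 : Int)) = true <;>
      simp_all

theorem colsLoop_eq (c : List Int) (m : List (List Int)) (cols : List Int) :
    vrcColsLoop c m cols = if cols.any (fun col => [0,5].contains (m.foldl (fun acc row => if c.contains (PySem.List.pyGetD row col 0) then acc + 1 else acc) (0 : Int))) then some false else none := by
  induction cols with
  | nil => rfl
  | cons col rest ih =>
    simp only [vrcColsLoop, ih, List.any_cons]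
    by_cases h : ([0,5] : List Int).contains (m.foldl (fun acc row => if c.contains (PySem.List.pyGetD row col 0) then acc + 1 else acc) (0 : Int)) = true <;>
      simp_all

theorem opt_shape (ra ca : Bool) :
    (((if ra then some false else none : Option Bool).orElse
        (fun _ => if ca then some false else none)).getD true) = !(ra || ca) := by
  cases ra <;> cases ca <;> rfl

-- A's per-line membership tally is a countP
theorem foldl_count (c l : List Int) (acc : Int) :
    l.foldl (fun acc num => if c.contains num then acc + 1 else acc) acc
      = acc + (l.countP (fun num => c.contains num) : Int) := by
  induction l generalizing acc with
  | nil => simp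
  | cons x t ih =>
    simp only [List.foldl_cons, List.countP_cons, ih]
    by_cases h : c.contains x = true <;> simp_all <;> push_cast <;> omega

-- countP of a disjunction of pointwise-disjoint predicates
theorem countP_or (p q : Int → Bool) (s : List Int) (h : ∀ x ∈ s, ¬(p x = true ∧ q x = true)) :
    s.countP (fun x => p x || q x) = s.countP p + s.countP q := by
  induction s with
  | nil => simp
  | cons x t ih =>
    have hx := h x (by simp)
    simp only [List.countP_cons, ih (fun y hy => h y (by simp [hy]))]
    by_cases hp : p x = true <;> by_cases hq : q x = true <;> simp_all <;> omega

-- swap: counting elements of a nodup s inside t = counting elements of nodup t inside s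
theorem countP_swap (s t : List Int) (hs : s.Nodup) (ht : t.Nodup) :
    s.countP (fun n => t.contains n) = t.countP (fun v => s.contains v) := by
  induction t with
  | nil => simp
  | cons v t ih =>
    have hvt : v ∉ t := (List.nodup_cons.mp ht).1
    have htn : t.Nodup := (List.nodup_cons.mp ht).2
    have h1 : s.countP (fun n => (v :: t).contains n)
        = s.countP (fun n => n == v) + s.countP (fun n => t.contains n) := by
      have := countP_or (fun n => n == v) (fun n => t.contains n) s
        (fun x _ hx => hvt (by
          have : x = v := by simpa using hx.1
          simpa [this] using hx.2))
      simpa [List.contains_cons] using this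
    have h2 : s.countP (fun n => n == v) = if s.contains v then 1 else 0 := by
      have hc : s.countP (fun n => n == v) = s.count v := by
        simp [List.count_eq_countP, Bool.beq_comm]
      by_cases hv : v ∈ s
      · rw [hc, List.count_eq_one_of_mem hs hv]; simp [hv]
      · rw [hc, List.count_eq_zero_of_not_mem hv]; simp [hv]
    rw [h1, h2, List.countP_cons, ih htn]
    by_cases hv : s.contains v = true <;> simp [hv] <;> omega

set_option maxHeartbeats 1000000 in
theorem key (c : List Int) : validate_rows_columns c = validate_rows_columns_alt c := by
  have pr05 : PySem.List.pyRange 0 5 1 = [0,1,2,3,4] := by decide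
  -- A's column tallies over the literal matrix are tallies over the column lists
  have col : ∀ k : Int, k ∈ ([0,1,2,3,4] : List Int) →
      ([[1,2,3,4,5],[6,7,8,9,10],[11,12,13,14,15],[16,17,18,19,20],[21,22,23,24,25]] : List (List Int)).foldl
        (fun acc row => if c.contains (PySem.List.pyGetD row k 0) then acc + 1 else acc) (0 : Int)
      = ([1 + k, 6 + k, 11 + k, 16 + k, 21 + k].foldl
          (fun acc num => if c.contains num then acc + 1 else acc) (0 : Int)) := by
    intro k hk
    fin_cases hk <;>
      norm_num [List.foldl, PySem.List.pyGetD, PySem.List.pyGet?, PySem.List.pyIdx?, Int.toNat]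
  -- the membership predicate of each grid line, as an arithmetic predicate
  have prow : ∀ r : Int, r ∈ ([0,1,2,3,4] : List Int) → ∀ n : Int,
      (decide (1 ≤ n ∧ n ≤ 25 ∧ PySem.Int.floordiv (n - 1) 5 = r))
        = ([1 + 5*r, 2 + 5*r, 3 + 5*r, 4 + 5*r, 5 + 5*r] : List Int).contains n := by
    intro r hr n
    fin_cases hr <;>
      (rw [Bool.eq_iff_iff, PySem.Int.floordiv_eq_ediv_of_pos (by norm_num : (0:Int) < 5)]
       simp only [decide_eq_true_eq, List.contains_eq_mem, List.mem_cons, List.not_mem_nil, or_false]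
       norm_num
       omega)
  have pcol : ∀ k : Int, k ∈ ([0,1,2,3,4] : List Int) → ∀ n : Int,
      (decide (1 ≤ n ∧ n ≤ 25 ∧ PySem.Int.mod (n - 1) 5 = k))
        = ([1 + k, 6 + k, 11 + k, 16 + k, 21 + k] : List Int).contains n := by
    intro k hk n
    fin_cases hk <;>
      (rw [Bool.eq_iff_iff, PySem.Int.mod_eq_emod_of_pos (by norm_num : (0:Int) < 5)]
       simp only [decide_eq_true_eq, List.contains_eq_mem, List.mem_cons, List.not_mem_nil, or_false]
       norm_num
       omega)
  -- a tally over a duplicate-free grid line equals the bucket count over set(c)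
  have swap : ∀ l : List Int, l.Nodup →
      l.foldl (fun acc num => if c.contains num then acc + 1 else acc) (0 : Int)
        = ((PySem.Set.ofList c).countP (fun n => l.contains n) : Int) := by
    intro l hl
    rw [foldl_count, zero_add, countP_swap _ l (PySem.Set.nodup_ofList c) hl]
    have : (l.countP fun v => List.contains (PySem.Set.ofList c) v) = l.countP (fun v => c.contains v) := by
      apply List.countP_congr
      intro v _
      simp [PySem.Set.mem_ofList]
    rw [this]
  have bucketR : ∀ r : Int, r ∈ ([0,1,2,3,4] : List Int) →
      ([1 + 5*r, 2 + 5*r, 3 + 5*r, 4 + 5*r, 5 + 5*r] : List Int).foldl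
        (fun acc num => if c.contains num then acc + 1 else acc) (0 : Int) = (cntR r (PySem.Set.ofList c) : Int) := by
    intro r hr
    rw [swap _ (by fin_cases hr <;> decide)]
    norm_cast
    rw [cntR]
    exact (List.countP_congr (fun n _ => by rw [prow r hr n])).symm
  have bucketC : ∀ k : Int, k ∈ ([0,1,2,3,4] : List Int) →
      ([1 + k, 6 + k, 11 + k, 16 + k, 21 + k] : List Int).foldl
        (fun acc num => if c.contains num then acc + 1 else acc) (0 : Int) = (cntC k (PySem.Set.ofList c) : Int) := by
    intro k hk
    rw [swap _ (by fin_cases hk <;> decide)]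
    norm_cast
    rw [cntC]
    exact (List.countP_congr (fun n _ => by rw [pcol k hk n])).symm
  have bound : ∀ l : List Int,
      l.foldl (fun acc num => if c.contains num then acc + 1 else acc) (0 : Int) ≤ (l.length : Int) := by
    intro l
    rw [foldl_count, zero_add]
    exact_mod_cast Nat.cast_le.mpr List.countP_le_length
  have br : ∀ r : Int, r ∈ ([0,1,2,3,4] : List Int) → (cntR r (PySem.Set.ofList c) : Int) ≤ 5 := by
    intro r hr
    have := bound [1 + 5*r, 2 + 5*r, 3 + 5*r, 4 + 5*r, 5 + 5*r]
    rw [bucketR r hr] at this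
    simpa using this
  have bc : ∀ k : Int, k ∈ ([0,1,2,3,4] : List Int) → (cntC k (PySem.Set.ofList c) : Int) ≤ 5 := by
    intro k hk
    have := bound [1 + k, 6 + k, 11 + k, 16 + k, 21 + k]
    rw [bucketC k hk] at this
    simpa using this
  have br0 := br 0 (by decide); have br1 := br 1 (by decide); have br2 := br 2 (by decide)
  have br3 := br 3 (by decide); have br4 := br 4 (by decide)
  have bc0 := bc 0 (by decide); have bc1 := bc 1 (by decide); have bc2 := bc 2 (by decide)
  have bc3 := bc 3 (by decide); have bc4 := bc 4 (by decide)
  -- assemble both sides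
  simp only [validate_rows_columns, matrix_lit, rowsLoop_eq, colsLoop_eq, pr05]
  rw [opt_shape]
  simp only [validate_rows_columns_alt, fold_eq, List.any_cons, List.any_nil, List.all_cons, List.all_nil,
    Bool.or_false, Bool.and_true, zero_add]
  rw [col 0 (by decide), col 1 (by decide), col 2 (by decide), col 3 (by decide), col 4 (by decide),
      bucketC 0 (by decide), bucketC 1 (by decide), bucketC 2 (by decide), bucketC 3 (by decide), bucketC 4 (by decide)]
  have row0 := bucketR 0 (by decide); have row1 := bucketR 1 (by decide)
  have row2 := bucketR 2 (by decide); have row3 := bucketR 3 (by decide)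
  have row4 := bucketR 4 (by decide)
  rw [show ([1 + 5*0, 2 + 5*0, 3 + 5*0, 4 + 5*0, 5 + 5*0] : List Int) = [1,2,3,4,5] from by norm_num] at row0
  rw [show ([1 + 5*1, 2 + 5*1, 3 + 5*1, 4 + 5*1, 5 + 5*1] : List Int) = [6,7,8,9,10] from by norm_num] at row1
  rw [show ([1 + 5*2, 2 + 5*2, 3 + 5*2, 4 + 5*2, 5 + 5*2] : List Int) = [11,12,13,14,15] from by norm_num] at row2
  rw [show ([1 + 5*3, 2 + 5*3, 3 + 5*3, 4 + 5*3, 5 + 5*3] : List Int) = [16,17,18,19,20] from by norm_num] at row3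
  rw [show ([1 + 5*4, 2 + 5*4, 3 + 5*4, 4 + 5*4, 5 + 5*4] : List Int) = [21,22,23,24,25] from by norm_num] at row4
  rw [row0, row1, row2, row3, row4]
  rw [Bool.eq_iff_iff]
  simp only [Bool.not_eq_true', Bool.or_eq_false_iff, Bool.and_eq_true, List.contains_eq_mem,
    decide_eq_false_iff_not, decide_eq_true_eq, List.mem_cons, List.mem_singleton, List.not_mem_nil,
    or_false, not_or]
  omega

-- ===== VERDICT =====
theorem validate_rows_columns_spec : Claim_equal_validate_rows_columns := by
  intro combination _
  exact key combination
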